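-- pv_equiv track=rewrite | github.com/LisaNolte/bioinformatik-101 | assignment2/ba1k.py | pattern_to_number_prefix
-- ===== SOURCE A (Python) =====
-- def symbol_to_number(symbol):                   #definieren der Funktion Symbol_to_number, durch die A,C,G und T je einen Integer zugewiesen bekommen
--     if symbol == "A":
--         return 0
--     if symbol == "C":
--         return 1
--     if symbol == "G":
--         return 2
--     if symbol == "T":
--         return 3
--
-- def pattern_to_number_prefix(prefix):           #definieren der Funktion pattern_to_number_prefix, die die umgewandelte Nummer des Präfixes zurückgibt
--     if len(prefix) == 0:
--         return 0
--     else: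
--         prefix_number=0                         #definieren der Variable prefix_number; muss definiert sein, damit man was drauf addieren kann
--         for i in range(0,len(prefix)):          #für alle Werte i zwischen 0 und dem Ende des Präfixes (bzw. der vorletzten Zahl)
--             prefix_number += symbol_to_number(prefix[len(prefix)-i-1])*4**(i+1) #Berechnung der Nummer des Präfixes: multipliziere das symbol_to_number des von rechts ersten Buchstaben des Präfixes mit 4**n, wobei 4 die Basis ist (da wir im 4er Zahlensystem sind) und n das "Gewicht", also die Position von hinten (i+1)
--         return prefix_number
-- ===== SOURCE B (Python) =====
-- def symbol_to_number(symbol):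
--     if symbol == "A":
--         return 0
--     if symbol == "C":
--         return 1
--     if symbol == "G":
--         return 2
--     if symbol == "T":
--         return 3
--
-- def pattern_to_number_prefix(prefix):
--     acc = 0
--     for ch in prefix:
--         acc = acc * 4 + symbol_to_number(ch)
--     return acc * 4
-- ===== Notes on version B (the rewrite author's own statement) =====
-- stated objective: simpler
-- what changed: Replaces the right-to-left explicit-power sum (4**(i+1) per position, with a special empty-string guard) by a left-to-right Horner accumulation acc = acc*4 + digit followed by a single final *4 shift; the empty-prefix branch disappears.
import Mathlib
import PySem

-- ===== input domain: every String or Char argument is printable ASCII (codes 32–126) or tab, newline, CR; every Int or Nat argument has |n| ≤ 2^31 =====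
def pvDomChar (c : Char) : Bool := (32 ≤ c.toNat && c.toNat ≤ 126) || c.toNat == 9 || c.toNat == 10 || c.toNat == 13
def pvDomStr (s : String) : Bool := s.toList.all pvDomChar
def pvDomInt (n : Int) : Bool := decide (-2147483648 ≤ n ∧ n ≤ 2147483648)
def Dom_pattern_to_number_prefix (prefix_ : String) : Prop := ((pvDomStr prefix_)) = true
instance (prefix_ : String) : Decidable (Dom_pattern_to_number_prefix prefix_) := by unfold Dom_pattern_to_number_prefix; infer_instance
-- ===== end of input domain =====

-- B replaces A's right-to-left explicit-power sum by a left-to-right Horner accumulation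
-- with one final *4 shift (objective: simpler; same proved return value on Pre_).

-- ===== PORT A =====
-- symbol_to_number: returns none for a non-nucleotide character (Python returns None,
-- which makes pattern_to_number_prefix raise TypeError; Pre_ excludes those inputs).
def symbol_to_number (symbol : Char) : Option Int :=
  if symbol = 'A' then some 0
  else if symbol = 'C' then some 1
  else if symbol = 'G' then some 2
  else if symbol = 'T' then some 3
  else none

def pattern_to_number_prefix (prefix_ : String) : Int :=
  let l := prefix_.toList
  if l.length = 0 then 0
  else
    (PySem.List.pyRange 0 (l.length : Int) 1).foldl
      (fun prefix_number i =>
        prefix_number +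
          ((PySem.List.pyGet? l ((l.length : Int) - i - 1)).bind symbol_to_number).getD 0
            * 4 ^ (i + 1).toNat)
      0

-- ===== PORT B =====
def pattern_to_number_prefix_alt (prefix_ : String) : Int :=
  (prefix_.toList.foldl (fun acc ch => acc * 4 + (symbol_to_number ch).getD 0) 0) * 4

-- ===== PRECONDITION & SPEC =====
-- Pre_ excludes prefixes containing a character other than the four nucleotide letters:
-- there symbol_to_number returns None and Python A raises TypeError (B raises likewise).
def Pre_pattern_to_number_prefix (prefix_ : String) : Prop :=
  (prefix_.toList.all fun c => c == 'A' || c == 'C' || c == 'G' || c == 'T') = true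
instance (prefix_ : String) : Decidable (Pre_pattern_to_number_prefix prefix_) := by
  unfold Pre_pattern_to_number_prefix; infer_instance
def pvWitness_pattern_to_number_prefix : String := "AC"

def Spec_pattern_to_number_prefix (prefix_ : String) (out : Int) : Prop :=
  out = pattern_to_number_prefix_alt prefix_
instance (prefix_ : String) (out : Int) : Decidable (Spec_pattern_to_number_prefix prefix_ out) := by
  unfold Spec_pattern_to_number_prefix; infer_instance

-- ===== CLAIM (what is proved, stated in full; the proofs are below) =====
def Claim_equal_pattern_to_number_prefix : Prop :=
  ∀ (prefix_ : String), Dom_pattern_to_number_prefix prefix_ →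
    Pre_pattern_to_number_prefix prefix_ →
    Spec_pattern_to_number_prefix prefix_ (pattern_to_number_prefix prefix_)

-- ===== LEMMAS AND PROOFS =====

-- the digit of a character, totalized as A's and B's ports totalize it
def pvSym (c : Char) : Int := (symbol_to_number c).getD 0

-- B's core accumulation with a generalized initial accumulator
theorem pv_horner_shift (l : List Char) (a : Int) :
    l.foldl (fun acc ch => acc * 4 + pvSym ch) a
      = a * 4 ^ l.length + l.foldl (fun acc ch => acc * 4 + pvSym ch) 0 := by
  induction l generalizing a with
  | nil => simp
  | cons c l ih =>
    simp only [List.foldl_cons, List.length_cons]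
    rw [ih (a * 4 + pvSym c), ih (0 * 4 + pvSym c)]
    ring

-- A's loop over the index range equals B's Horner value times 4
theorem pv_main (l : List Char) :
    (PySem.List.pyRange 0 (l.length : Int) 1).foldl
      (fun prefix_number i =>
        prefix_number +
          ((PySem.List.pyGet? l ((l.length : Int) - i - 1)).bind symbol_to_number).getD 0
            * 4 ^ (i + 1).toNat)
      0
    = (l.foldl (fun acc ch => acc * 4 + pvSym ch) 0) * 4 := by
  induction l with
  | nil => simp [PySem.List.pyRange_one_eq_nil]
  | cons c l ih =>
    have hn : ((c :: l).length : Int) = (l.length : Int) + 1 := by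
      simp
    rw [hn, PySem.List.pyRange_one_succ_right (by positivity), List.foldl_append]
    have hcong :
        (PySem.List.pyRange 0 (l.length : Int) 1).foldl
          (fun prefix_number i =>
            prefix_number +
              ((PySem.List.pyGet? (c :: l) ((l.length : Int) + 1 - i - 1)).bind
                  symbol_to_number).getD 0 * 4 ^ (i + 1).toNat) 0
        = (PySem.List.pyRange 0 (l.length : Int) 1).foldl
          (fun prefix_number i =>
            prefix_number +
              ((PySem.List.pyGet? l ((l.length : Int) - i - 1)).bind
                  symbol_to_number).getD 0 * 4 ^ (i + 1).toNat) 0 := by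
      apply PySem.List.foldl_congr_mem
      intro acc i hi
      have hmem := (PySem.List.mem_pyRange_one).1 hi
      have h0 : (0:Int) ≤ i := hmem.1
      have h1 : i < (l.length : Int) := hmem.2
      have hk : ∃ k : ℕ, ((l.length : Int) - i - 1) = (k : Int) ∧ k < l.length := by
        refine ⟨((l.length : Int) - i - 1).toNat, ?_, ?_⟩ <;> omega
      obtain ⟨k, hkeq, hklt⟩ := hk
      have : (l.length : Int) + 1 - i - 1 = ((k + 1 : ℕ) : Int) := by push_cast; omega
      rw [this, hkeq, PySem.List.pyGet?_natCast, PySem.List.pyGet?_natCast]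
      simp
    rw [hcong, ih]
    simp only [List.foldl_cons, List.foldl_nil]
    have hidx : (l.length : Int) + 1 - (l.length : Int) - 1 = ((0 : ℕ) : Int) := by omega
    rw [hidx, PySem.List.pyGet?_natCast]
    have hpow : ((l.length : Int) + 1).toNat = l.length + 1 := by omega
    simp only [List.getElem?_cons_zero, Option.bind, hpow]
    rw [pv_horner_shift l (0 * 4 + pvSym c)]
    show _ = (_ : Int)
    simp only [pvSym]
    ring

-- ===== VERDICT (by name: the statement is the Claim_ definition above) =====
theorem pattern_to_number_prefix_spec : Claim_equal_pattern_to_number_prefix := by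
  intro prefix_ _ _
  unfold Spec_pattern_to_number_prefix pattern_to_number_prefix pattern_to_number_prefix_alt
  by_cases h : prefix_.toList.length = 0
  · simp [List.length_eq_zero_iff.mp h]
  · simp only [h, if_false]
    exact pv_main prefix_.toList
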